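-- pv_equiv track=rewrite | github.com/Amakoye/dsa-practice | arrays_strings/two-pointer/intersection_of_two_arrays.py | intersectionII
-- ===== SOURCE A (Python) =====
-- from typing import List
--
-- def intersectionII(nums1: List[int], nums2: List[int]) -> List[int]:
--     nums1.sort()
--     nums2.sort()
--     pointer1 = 0
--     pointer2 = 0
--
--     intersection_list: List[int] = []
--
--     while pointer1 < len(nums1) and pointer2 < len(nums2):
--         if nums1[pointer1] == nums2[pointer2]:
--             intersection_list.append(nums1[pointer1])
--             pointer1 += 1
--             pointer2 += 1
--
--         elif nums1[pointer1] < nums2[pointer2]: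
--             pointer1 += 1
--         else:
--             pointer2 += 1
--
--     return intersection_list
-- ===== SOURCE B (Python) =====
-- from typing import List
--
-- def intersectionII(nums1: List[int], nums2: List[int]) -> List[int]:
--     # Counting-based multiset intersection (no two-pointer merge).
--     # Note: unlike A, this does not sort its arguments in place;
--     # the equivalence is about the return value only.
--     c1 = {}
--     for x in nums1:
--         c1[x] = c1.get(x, 0) + 1
--     c2 = {}
--     for x in nums2:
--         c2[x] = c2.get(x, 0) + 1
--     out: List[int] = []
--     for x, n in c1.items():
--         out += [x] * min(n, c2.get(x, 0))
--     return sorted(out)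
-- ===== Notes on version B (the rewrite author's own statement) =====
-- stated objective: alternative
-- what changed: Replaced sort-both-then-two-pointer-merge by a hash-count intersection: build a count dict per list, emit each value min(count1,count2) times, and sort the (short) result; A's in-place sorting of its arguments is a side effect B does not reproduce (return values agree).
import Mathlib
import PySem

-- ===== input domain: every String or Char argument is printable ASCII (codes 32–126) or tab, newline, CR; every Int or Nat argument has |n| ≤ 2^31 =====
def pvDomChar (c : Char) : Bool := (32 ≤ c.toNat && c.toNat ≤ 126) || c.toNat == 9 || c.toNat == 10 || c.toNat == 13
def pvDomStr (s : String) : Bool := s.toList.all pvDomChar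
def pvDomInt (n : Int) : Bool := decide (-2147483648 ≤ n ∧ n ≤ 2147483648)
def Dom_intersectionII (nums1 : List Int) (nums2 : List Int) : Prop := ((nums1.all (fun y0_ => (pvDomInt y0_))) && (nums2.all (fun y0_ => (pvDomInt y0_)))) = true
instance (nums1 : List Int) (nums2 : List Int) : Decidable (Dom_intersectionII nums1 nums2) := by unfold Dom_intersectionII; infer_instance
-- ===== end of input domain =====

-- B replaces A's sort-both-then-two-pointer merge by a count-dict multiset
-- intersection (alternative algorithm); A sorts its arguments IN PLACE, B does
-- not — the equivalence proved is about the return value only.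

-- ===== PORT A =====
-- the while loop over (pointer1, pointer2): the obvious structural recursion on
-- the two remaining suffixes of the sorted lists
def twoPtrLoop (s1 : List Int) (s2 : List Int) : List Int :=
  match s1, s2 with
  | a :: t1, b :: t2 =>
    if a = b then a :: twoPtrLoop t1 t2
    else if a < b then twoPtrLoop t1 (b :: t2)
    else twoPtrLoop (a :: t1) t2
  | _, _ => []
termination_by s1.length + s2.length
decreasing_by all_goals (simp only [List.length_cons]; omega)

def intersectionII (nums1 : List Int) (nums2 : List Int) : List Int :=
  twoPtrLoop (PySem.List.sorted nums1 (fun x => x) false)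
             (PySem.List.sorted nums2 (fun x => x) false)

-- ===== PORT B =====
def intersectionII_alt (nums1 : List Int) (nums2 : List Int) : List Int :=
  let c1 := nums1.foldl (fun d x => d.insert x (d.getD x 0 + 1)) PySem.Dict.empty
  let c2 := nums2.foldl (fun d x => d.insert x (d.getD x 0 + 1)) PySem.Dict.empty
  let out := c1.items.foldl
    (fun acc (p : Int × Int) => acc ++ List.replicate (min p.2 (c2.getD p.1 0)).toNat p.1) []
  PySem.List.sorted out (fun x => x) false

-- ===== PRECONDITION & SPEC =====
def Spec_intersectionII (nums1 : List Int) (nums2 : List Int) (out : List Int) : Prop := out = intersectionII_alt nums1 nums2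
instance (nums1 : List Int) (nums2 : List Int) (out : List Int) : Decidable (Spec_intersectionII nums1 nums2 out) := by unfold Spec_intersectionII; infer_instance

-- ===== CLAIM (what is proved, stated in full; the proofs are below) =====
def Claim_equal_intersectionII : Prop := ∀ (nums1 : List Int) (nums2 : List Int), Dom_intersectionII nums1 nums2 → Spec_intersectionII nums1 nums2 (intersectionII nums1 nums2)

-- ===== LEMMAS AND PROOFS =====

-- every element of the merge output comes from the first list
theorem mem_twoPtrLoop {x : Int} {s1 s2 : List Int} (h : x ∈ twoPtrLoop s1 s2) : x ∈ s1 := by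
  induction s1, s2 using twoPtrLoop.induct with
  | case1 t1 b t2 ih =>
    rw [twoPtrLoop, if_pos rfl] at h
    rcases List.mem_cons.mp h with h | h
    · simp [h]
    · exact List.mem_cons_of_mem _ (ih h)
  | case2 a t1 b t2 hab hlt ih =>
    rw [twoPtrLoop, if_neg hab, if_pos hlt] at h
    exact List.mem_cons_of_mem _ (ih h)
  | case3 a t1 b t2 hab hlt ih =>
    rw [twoPtrLoop, if_neg hab, if_neg hlt] at h
    exact ih h
  | case4 s1 s2 hne =>
    cases s1 with
    | nil => rw [twoPtrLoop.eq_def] at h; simp at h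
    | cons a t1 =>
      cases s2 with
      | nil => rw [twoPtrLoop.eq_def] at h; simp at h
      | cons b t2 => exact (hne a t1 b t2 rfl rfl).elim

-- count characterisation of the two-pointer merge on sorted inputs
theorem count_twoPtrLoop (x : Int) (s1 s2 : List Int)
    (h1 : s1.Pairwise (· ≤ ·)) (h2 : s2.Pairwise (· ≤ ·)) :
    (twoPtrLoop s1 s2).count x = min (s1.count x) (s2.count x) := by
  induction s1, s2 using twoPtrLoop.induct with
  | case1 t1 b t2 ih =>
    rw [twoPtrLoop, if_pos rfl]
    simp only [List.count_cons]
    rw [ih h1.tail h2.tail]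
    omega
  | case2 a t1 b t2 hab hlt ih =>
    rw [twoPtrLoop, if_neg hab, if_pos hlt, ih h1.tail h2]
    by_cases hx : x = a
    · subst hx
      have hnot : x ∉ b :: t2 := by
        intro hmem
        rcases List.mem_cons.mp hmem with h | h
        · omega
        · have := (List.pairwise_cons.mp h2).1 x h; omega
      rw [List.count_eq_zero_of_not_mem hnot]
      simp
    · have ha : a ≠ x := fun h => hx h.symm
      simp [List.count_cons, ha]
  | case3 a t1 b t2 hab hlt ih =>
    rw [twoPtrLoop, if_neg hab, if_neg hlt, ih h1 h2.tail]
    by_cases hx : x = b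
    · subst hx
      have hnot : x ∉ a :: t1 := by
        intro hmem
        rcases List.mem_cons.mp hmem with h | h
        · omega
        · have := (List.pairwise_cons.mp h1).1 x h; omega
      rw [List.count_eq_zero_of_not_mem hnot]
      simp
    · have hb : b ≠ x := fun h => hx h.symm
      simp [List.count_cons, hb]
  | case4 s1 s2 hne =>
    cases s1 with
    | nil => rw [twoPtrLoop.eq_def]; simp
    | cons a t1 =>
      cases s2 with
      | nil => rw [twoPtrLoop.eq_def]; simp
      | cons b t2 => exact (hne a t1 b t2 rfl rfl).elim

-- the merge output is sorted when the first input is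
theorem sorted_twoPtrLoop (s1 s2 : List Int) (h1 : s1.Pairwise (· ≤ ·)) :
    (twoPtrLoop s1 s2).Pairwise (· ≤ ·) := by
  induction s1, s2 using twoPtrLoop.induct with
  | case1 t1 b t2 ih =>
    rw [twoPtrLoop, if_pos rfl]
    refine List.pairwise_cons.mpr ⟨?_, ih h1.tail⟩
    intro y hy
    exact (List.pairwise_cons.mp h1).1 y (mem_twoPtrLoop hy)
  | case2 a t1 b t2 hab hlt ih =>
    rw [twoPtrLoop, if_neg hab, if_pos hlt]
    exact ih h1.tail
  | case3 a t1 b t2 hab hlt ih =>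
    rw [twoPtrLoop, if_neg hab, if_neg hlt]
    exact ih h1
  | case4 s1 s2 hne =>
    cases s1 with
    | nil => rw [twoPtrLoop.eq_def]; exact List.Pairwise.nil
    | cons a t1 =>
      cases s2 with
      | nil => rw [twoPtrLoop.eq_def]; exact List.Pairwise.nil
      | cons b t2 => exact (hne a t1 b t2 rfl rfl).elim

-- count of a block-concatenation over a nodup key list
theorem count_flatMap_replicate (x : Int) (ks : List Int) (f : Int → Nat)
    (hnd : ks.Nodup) :
    (ks.flatMap (fun k => List.replicate (f k) k)).count x =
      if x ∈ ks then f x else 0 := by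
  induction ks with
  | nil => simp
  | cons k t ih =>
    simp only [List.flatMap_cons, List.count_append, List.count_replicate]
    rw [ih (List.nodup_cons.mp hnd).2]
    by_cases hx : x = k
    · subst hx
      have hxt : x ∉ t := (List.nodup_cons.mp hnd).1
      simp [hxt]
    · have hk : ¬ k = x := fun h => hx h.symm
      simp [hx, hk, List.mem_cons]

-- count characterisation of B's output
theorem count_alt (x : Int) (nums1 nums2 : List Int) :
    (intersectionII_alt nums1 nums2).count x = min (nums1.count x) (nums2.count x) := by
  unfold intersectionII_alt
  simp only [PySem.Dict.foldl_insert_getD_add_one_eq_counter]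
  rw [(PySem.List.sorted_perm _ _ _).count_eq]
  rw [PySem.List.foldl_append_eq_flatMap, List.nil_append, PySem.Dict.items_counter,
      List.flatMap_map]
  have hbody : ∀ k : Int,
      List.replicate (min ((nums1.count k : Int)) ((PySem.Dict.counter nums2).getD k 0)).toNat k
        = List.replicate (min (nums1.count k) (nums2.count k)) k := by
    intro k
    rw [PySem.Dict.getD_counter]
    congr 1
    omega
  calc (List.flatMap (fun k => List.replicate (min ((nums1.count k : Int)) ((PySem.Dict.counter nums2).getD k 0)).toNat k) (PySem.Set.ofList nums1)).count x
      = (List.flatMap (fun k => List.replicate (min (nums1.count k) (nums2.count k)) k) (PySem.Set.ofList nums1)).count x := by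
        rw [List.flatMap_congr (fun k _ => hbody k)]
    _ = min (nums1.count x) (nums2.count x) := by
        rw [count_flatMap_replicate x _ _ (PySem.Set.nodup_ofList nums1)]
        by_cases hx : x ∈ nums1
        · rw [if_pos ((PySem.Set.mem_ofList _ _).mpr hx)]
        · rw [if_neg (fun h => hx ((PySem.Set.mem_ofList _ _).mp h))]
          rw [List.count_eq_zero_of_not_mem hx]
          omega

-- B's output is sorted
theorem pairwise_alt (nums1 nums2 : List Int) :
    (intersectionII_alt nums1 nums2).Pairwise (· ≤ ·) :=
  PySem.List.sorted_pairwise _ _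

-- ===== VERDICT (by name: the statement is the Claim_ definition above) =====
theorem intersectionII_spec : Claim_equal_intersectionII := by
  intro nums1 nums2 _
  unfold Spec_intersectionII intersectionII
  have hperm : (twoPtrLoop (PySem.List.sorted nums1 (fun x => x) false)
                           (PySem.List.sorted nums2 (fun x => x) false)).Perm
               (intersectionII_alt nums1 nums2) := by
    rw [List.perm_iff_count]
    intro a
    rw [count_alt a nums1 nums2,
        count_twoPtrLoop a _ _ (PySem.List.sorted_pairwise _ _) (PySem.List.sorted_pairwise _ _),
        (PySem.List.sorted_perm nums1 (fun x => x) false).count_eq,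
        (PySem.List.sorted_perm nums2 (fun x => x) false).count_eq]
  exact List.eq_of_perm_of_sorted (fun a b _ _ h1 h2 => le_antisymm h1 h2)
    (sorted_twoPtrLoop _ _ (PySem.List.sorted_pairwise _ _)) (pairwise_alt nums1 nums2) hperm
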